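-- pv_equiv track=rewrite | github.com/Ivisayanel/UPC-42BCN | Detecció d'idioma/functions.py | Tr_txt
-- ===== SOURCE A (Python) =====
-- def Tr_txt(text):
--     # chr from ascii to character
--     # ord from character to ascii
--     str = ""
--     j = 0
--     i = 0
--     ln = len(text)
--     while i < ln:
--         carac = ord(text[i])
--         if (carac >= 9 and carac <= 12):
--             carac = ord(" ")
--         if carac >= ord("0") and carac <= ord("9"):
--             pass
--         elif carac >= ord("A") and carac <= ord("Z"):
--             str += chr(carac + 32)
--             j += 1
--         elif carac == ord(" "):
--             if (j != 0 and str[j - 1] == " ") or j == 0: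
--                 pass
--             else:
--                 str += chr(carac)
--                 j += 1
--         else:
--             str += chr(carac)
--             j += 1
--         i += 1
--     return str
-- ===== SOURCE B (Python) =====
-- def Tr_txt(text):
--     # table-driven transform (lowercase A-Z, delete digits, ords 9-12 -> space),
--     # then one pairwise pass collapses space runs and drops a leading run
--     table = {c: c + 32 for c in range(ord('A'), ord('Z') + 1)}
--     table.update({c: None for c in range(ord('0'), ord('9') + 1)})
--     table.update({c: ord(' ') for c in range(9, 13)})
--     t = text.translate(table)
--     return ''.join(c for p, c in zip(' ' + t, t) if c != ' ' or p != ' ')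
-- ===== Notes on version B (the rewrite author's own statement) =====
-- stated objective: idiomatic
-- what changed: Replaced A's single-pass index/state machine (which re-reads its own output string to decide whether to emit a space) by a table-driven per-character transform (str.translate: lowercase A-Z, delete digits, ords 9-12 to space) followed by one pairwise zip-with-predecessor pass that collapses space runs and drops a leading run; the C-level translate and join avoid A's per-character string concatenation and indexing.
import Mathlib
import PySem

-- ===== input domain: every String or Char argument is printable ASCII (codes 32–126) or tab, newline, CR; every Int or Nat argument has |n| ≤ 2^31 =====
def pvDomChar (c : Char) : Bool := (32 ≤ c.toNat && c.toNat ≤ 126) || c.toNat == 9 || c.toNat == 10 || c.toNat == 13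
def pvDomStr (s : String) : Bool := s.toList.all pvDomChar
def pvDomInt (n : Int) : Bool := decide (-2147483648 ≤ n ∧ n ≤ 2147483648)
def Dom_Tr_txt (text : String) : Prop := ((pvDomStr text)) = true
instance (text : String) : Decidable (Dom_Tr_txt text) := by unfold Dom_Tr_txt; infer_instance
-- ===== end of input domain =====

-- B replaces A's single-pass state machine (which re-reads its own output to collapse
-- spaces) by a table-driven per-char transform followed by one pairwise collapse pass
-- (objective: idiomatic).

-- ===== PORT A =====
-- A's while loop: index i over the text, accumulator `str` (here acc) and its length j;
-- a space is skipped when nothing was emitted yet or the last emitted char is a space.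
def Tr_txt_loop (acc : List Char) (j : Nat) : List Char → List Char
  | [] => acc
  | c :: rest =>
    let carac := c.toNat
    let carac := if 9 ≤ carac ∧ carac ≤ 12 then 32 else carac
    if 48 ≤ carac ∧ carac ≤ 57 then
      Tr_txt_loop acc j rest
    else if 65 ≤ carac ∧ carac ≤ 90 then
      Tr_txt_loop (acc ++ [Char.ofNat (carac + 32)]) (j + 1) rest
    else if carac = 32 then
      if (j ≠ 0 ∧ acc.getD (j - 1) ' ' = ' ') ∨ j = 0 then
        Tr_txt_loop acc j rest
      else
        Tr_txt_loop (acc ++ [Char.ofNat carac]) (j + 1) rest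
    else
      Tr_txt_loop (acc ++ [Char.ofNat carac]) (j + 1) rest

def Tr_txt (text : String) : String := String.mk (Tr_txt_loop [] 0 text.toList)

-- ===== PORT B =====
-- Source B's translation table as a function: A–Z ↦ +32, digits ↦ delete, ords 9–12 ↦ space.
def trTable (c : Char) : Option Char :=
  if 65 ≤ c.toNat ∧ c.toNat ≤ 90 then some (Char.ofNat (c.toNat + 32))
  else if 48 ≤ c.toNat ∧ c.toNat ≤ 57 then none
  else if 9 ≤ c.toNat ∧ c.toNat ≤ 12 then some ' '
  else some c

-- ''.join(c for p, c in zip(' ' + t, t) if c != ' ' or p != ' ')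
def Tr_txt_alt (text : String) : String :=
  let t := text.toList.filterMap trTable
  String.mk (((((' ' :: t).zip t).filter (fun pc => pc.2 != ' ' || pc.1 != ' ')).map Prod.snd))

-- ===== PRECONDITION & SPEC =====
def Spec_Tr_txt (text : String) (out : String) : Prop := out = Tr_txt_alt text
instance (text : String) (out : String) : Decidable (Spec_Tr_txt text out) := by unfold Spec_Tr_txt; infer_instance

-- ===== CLAIM (what is proved, stated in full; the proofs are below) =====
def Claim_equal_Tr_txt : Prop := ∀ (text : String), Dom_Tr_txt text → Spec_Tr_txt text (Tr_txt text)

-- ===== LEMMAS AND PROOFS =====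

-- the common abstraction: collapse spaces, with b = "last kept char is a space (or start)"
def collapse (b : Bool) : List Char → List Char
  | [] => []
  | c :: rest =>
    if c = ' ' then (if b then collapse true rest else ' ' :: collapse true rest)
    else c :: collapse false rest

theorem char_toNat_ofNat (n : Nat) (h : n < 55296) : (Char.ofNat n).toNat = n := by
  have hv : Nat.isValidChar n := Or.inl h
  rw [Char.ofNat, dif_pos hv]
  simp [Char.toNat, Char.ofNatAux]

theorem char_eq_space (c : Char) (h : c.toNat = 32) : c = ' ' := by
  have := Char.ofNat_toNat c
  rw [h] at this
  exact this.symm ▸ rfl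

theorem char_ne_space_of_toNat (c : Char) (h : c.toNat ≠ 32) : (c == ' ') = false := by
  simp only [beq_eq_false_iff_ne, ne_eq]
  intro he; exact h (he ▸ rfl)

-- B side: the zip-with-predecessor filter is `collapse` seeded by the predecessor char
theorem b_collapse (t : List Char) (p : Char) :
    ((((p :: t).zip t).filter (fun pc => pc.2 != ' ' || pc.1 != ' ')).map Prod.snd)
      = collapse (p == ' ') t := by
  induction t generalizing p with
  | nil => simp [collapse]
  | cons c r ih =>
    simp only [List.zip_cons_cons, List.filter_cons, collapse]
    by_cases hc : c = ' '
    · subst hc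
      by_cases hp : p = ' '
      · subst hp; simpa using ih ' '
      · simp [hp, ih ' ']
    · have hcf : (c == ' ') = false := beq_eq_false_iff_ne.mpr hc
      simp [hc, hcf, ih c]

theorem getD_eq_getLastD (l : List Char) (d : Char) :
    l.getD (l.length - 1) d = l.getLastD d := by
  rw [List.getD_eq_getElem?_getD, List.getLastD_eq_getLast?, List.getLast?_eq_getElem?]

-- the space branch of A's loop, as one step of `collapse`
theorem a_space_step (acc rest : List Char)
    (ih : ∀ acc' : List Char, Tr_txt_loop acc' acc'.length rest
        = acc' ++ collapse (acc'.getLastD ' ' == ' ') (rest.filterMap trTable)) :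
    (if (acc.length ≠ 0 ∧ acc.getD (acc.length - 1) ' ' = ' ') ∨ acc.length = 0 then
      Tr_txt_loop acc acc.length rest
    else
      Tr_txt_loop (acc ++ [Char.ofNat 32]) (acc.length + 1) rest)
      = acc ++ collapse (acc.getLastD ' ' == ' ') (' ' :: rest.filterMap trTable) := by
  by_cases hb : acc.getLastD ' ' = ' '
  · rw [if_pos, ih acc]
    · rw [hb]; simp [collapse]
    · rcases acc.eq_nil_or_concat with h | ⟨l, x, h⟩
      · right; simp [h]
      · left
        refine ⟨by simp [h], ?_⟩
        rw [getD_eq_getLastD]; exact hb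
  · have hne : acc ≠ [] := by intro h; subst h; simp [List.getLastD] at hb
    rw [if_neg, show acc.length + 1 = (acc ++ [Char.ofNat 32]).length by simp,
      ih, List.getLastD_concat, show Char.ofNat 32 = ' ' from rfl]
    · have hb2 : ¬ acc.getLast?.getD ' ' = ' ' := by
        rw [← List.getLastD_eq_getLast?]; exact hb
      simp [collapse, hb2]
    · simp only [not_or, not_and, ne_eq]
      refine ⟨fun _ hg => hb ?_, by simpa using hne⟩
      rw [← getD_eq_getLastD]; exact hg

-- A side: the loop with j = acc.length is `collapse` on the translated suffix,
-- seeded by whether acc is empty or ends in a space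
theorem a_collapse (cs : List Char) (acc : List Char) :
    Tr_txt_loop acc acc.length cs
      = acc ++ collapse (acc.getLastD ' ' == ' ') (cs.filterMap trTable) := by
  induction cs generalizing acc with
  | nil => simp [Tr_txt_loop, collapse]
  | cons c rest ih =>
    simp only [Tr_txt_loop, List.filterMap_cons]
    by_cases h9 : 9 ≤ c.toNat ∧ c.toNat ≤ 12
    · have ht : trTable c = some ' ' := by
        unfold trTable; rw [if_neg (by omega), if_neg (by omega), if_pos h9]
      rw [ht, if_pos h9, if_neg (by omega : ¬(48 ≤ 32 ∧ 32 ≤ 57)),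
        if_neg (by omega : ¬(65 ≤ 32 ∧ 32 ≤ 90)), if_pos rfl]
      exact a_space_step acc rest ih
    · by_cases h48 : 48 ≤ c.toNat ∧ c.toNat ≤ 57
      · have ht : trTable c = none := by
          unfold trTable; rw [if_neg (by omega), if_pos h48]
        rw [ht, if_neg h9, if_pos h48]
        exact ih acc
      · by_cases h65 : 65 ≤ c.toNat ∧ c.toNat ≤ 90
        · have ht : trTable c = some (Char.ofNat (c.toNat + 32)) := by
            unfold trTable; rw [if_pos h65]
          have htn : (Char.ofNat (c.toNat + 32)).toNat = c.toNat + 32 :=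
            char_toNat_ofNat _ (by omega)
          have hef : (Char.ofNat (c.toNat + 32) == ' ') = false :=
            char_ne_space_of_toNat _ (by rw [htn]; omega)
          have he : Char.ofNat (c.toNat + 32) ≠ ' ' := by
            simpa using hef
          rw [ht, if_neg h9, if_neg h48, if_pos h65,
            show acc.length + 1 = (acc ++ [Char.ofNat (c.toNat + 32)]).length by simp,
            ih, List.getLastD_concat]
          simp [collapse, he, hef]
        · by_cases h32 : c.toNat = 32
          · have hc : c = ' ' := char_eq_space c h32
            have ht : trTable c = some ' ' := by
              unfold trTable; rw [if_neg h65, if_neg h48, if_neg h9, hc]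
            rw [ht, h32, if_neg (by omega : ¬(9 ≤ 32 ∧ 32 ≤ 12)),
              if_neg (by omega : ¬(48 ≤ 32 ∧ 32 ≤ 57)),
              if_neg (by omega : ¬(65 ≤ 32 ∧ 32 ≤ 90)), if_pos rfl]
            exact a_space_step acc rest ih
          · have ht : trTable c = some c := by
              unfold trTable; rw [if_neg h65, if_neg h48, if_neg h9]
            have hc : c ≠ ' ' := fun h => h32 (h ▸ rfl)
            rw [ht, if_neg h9, if_neg h48, if_neg h65, if_neg h32, Char.ofNat_toNat,
              show acc.length + 1 = (acc ++ [c]).length by simp,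
              ih, List.getLastD_concat]
            have hcf : (c == ' ') = false := beq_eq_false_iff_ne.mpr hc
            simp [collapse, hc, hcf]

-- ===== VERDICT (by name: the statement is the Claim_ definition above) =====
theorem Tr_txt_spec : Claim_equal_Tr_txt := by
  intro text _
  unfold Spec_Tr_txt Tr_txt Tr_txt_alt
  have h := a_collapse text.toList []
  simp only [List.length_nil] at h
  simp only [List.nil_append] at h
  rw [h]
  simp only [b_collapse]
  simp [List.getLastD]
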